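-- pv_equiv track=rewrite | github.com/HenryBui777/DataScience_ArXiv | processing_modelling/src/bib_deduplication.py | merge_bib_entries
-- ===== SOURCE A (Python) =====
-- def unionize_entries(entry1, entry2):
--     """merge 2 entries, ưu tiên giá trị dài hơn"""
--     merged = {'_type': entry1.get('_type', entry2.get('_type', 'misc'))}
--     all_fields = set(entry1.keys()) | set(entry2.keys())
--
--     for field in all_fields:
--         if field.startswith('_'):
--             continue
--         val1, val2 = entry1.get(field, ''), entry2.get(field, '')
--         if not val1:
--             merged[field] = val2
--         elif not val2:
--             merged[field] = val1
--         else: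
--             merged[field] = val1 if len(val1) >= len(val2) else val2
--
--     return merged
--
-- def merge_bib_entries(entries_list):
--     """gộp nhiều dict entries thành 1"""
--     merged = {}
--     for entries in entries_list:
--         for key, fields in entries.items():
--             if key not in merged:
--                 merged[key] = fields
--             else:
--                 merged[key] = unionize_entries(merged[key], fields)
--     return merged
-- ===== SOURCE B (Python) =====
-- def _pick(v1, v2):
--     if not v1:
--         return v2
--     if not v2:
--         return v1
--     return v1 if len(v1) >= len(v2) else v2
--
-- def _union(e1, e2):
--     merged = {'_type': e1.get('_type', e2.get('_type', 'misc'))}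
--     for field in set(e1.keys()) | set(e2.keys()):
--         if not field.startswith('_'):
--             merged[field] = _pick(e1.get(field, ''), e2.get(field, ''))
--     return merged
--
-- def merge_bib_entries(entries_list):
--     # pass 1: group the field-dicts of each key, in first-seen key order
--     index = {}
--     for entries in entries_list:
--         for key, fields in entries.items():
--             index.setdefault(key, []).append(fields)
--     # pass 2: reduce each group left-to-right
--     result = {}
--     for key, lst in index.items():
--         acc = lst[0]
--         for fields in lst[1:]:
--             acc = _union(acc, fields)
--         result[key] = acc
--     return result
-- ===== Notes on version B (the rewrite author's own statement) =====
-- stated objective: alternative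
-- what changed: B separates A's interleaved lookup-and-merge loop into two distinct passes: a grouping pass that builds an ordered index from each key to the list of its field-dicts, and a reduction pass that left-folds the union helper over each group; the union helper itself is decomposed with a separate value-picking function.
import Mathlib
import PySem

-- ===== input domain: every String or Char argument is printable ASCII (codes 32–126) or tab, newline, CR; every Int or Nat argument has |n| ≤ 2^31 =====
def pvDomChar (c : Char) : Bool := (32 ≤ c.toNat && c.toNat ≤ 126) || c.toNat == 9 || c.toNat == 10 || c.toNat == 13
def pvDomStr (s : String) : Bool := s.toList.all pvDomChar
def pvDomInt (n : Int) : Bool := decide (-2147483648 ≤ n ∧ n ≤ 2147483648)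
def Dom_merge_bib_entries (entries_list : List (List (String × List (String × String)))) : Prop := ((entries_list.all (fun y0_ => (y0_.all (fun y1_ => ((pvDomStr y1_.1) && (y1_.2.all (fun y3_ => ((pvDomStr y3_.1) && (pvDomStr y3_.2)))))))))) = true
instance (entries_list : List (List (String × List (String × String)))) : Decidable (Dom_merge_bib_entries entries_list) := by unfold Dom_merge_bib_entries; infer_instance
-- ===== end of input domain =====

-- B regroups the entries in one pass and then reduces each key's group in a second pass,
-- instead of A's interleaved lookup-and-merge single loop (objective: alternative decomposition, same cost).
-- Note on order: Python iterates `set(e1.keys()) | set(e2.keys())` in hash order; the ports use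
-- first-insertion order instead, so the ports are exact up to the (unspecified) key order of the
-- returned dicts, which is how dict outputs are compared.

-- ===== PORT A =====
def unionize_entries (entry1 entry2 : List (String × String)) : List (String × String) :=
  let d1 : PySem.Dict String String := PySem.Dict.mk entry1
  let d2 : PySem.Dict String String := PySem.Dict.mk entry2
  let merged : PySem.Dict String String :=
    PySem.Dict.insert PySem.Dict.empty "_type" (d1.getD "_type" (d2.getD "_type" "misc"))
  let all_fields : PySem.Set String :=
    PySem.Set.union (PySem.Set.ofList d1.keys) (PySem.Set.ofList d2.keys)
  (all_fields.foldl (fun m field =>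
      if PySem.Str.startswith field "_" then m
      else if d1.getD field "" = "" then m.insert field (d2.getD field "")
      else if d2.getD field "" = "" then m.insert field (d1.getD field "")
      else m.insert field
        (if PySem.Str.len (d2.getD field "") ≤ PySem.Str.len (d1.getD field "")
         then d1.getD field "" else d2.getD field ""))
    merged).items

def merge_bib_entries (entries_list : List (List (String × List (String × String)))) : List (String × List (String × String)) :=
  (entries_list.foldl
    (fun merged entries =>
      entries.foldl
        (fun merged kf =>
          if merged.contains kf.1 = false then merged.insert kf.1 kf.2
          else merged.insert kf.1 (unionize_entries (merged.getD kf.1 []) kf.2))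
        merged)
    (PySem.Dict.empty : PySem.Dict String (List (String × String)))).items

-- ===== PORT B =====
def pvPick (v1 v2 : String) : String :=
  if v1 = "" then v2
  else if v2 = "" then v1
  else if PySem.Str.len v2 ≤ PySem.Str.len v1 then v1 else v2

def pvUnionB (e1 e2 : List (String × String)) : List (String × String) :=
  let d1 : PySem.Dict String String := PySem.Dict.mk e1
  let d2 : PySem.Dict String String := PySem.Dict.mk e2
  let merged : PySem.Dict String String :=
    PySem.Dict.insert PySem.Dict.empty "_type" (d1.getD "_type" (d2.getD "_type" "misc"))
  let all_fields : PySem.Set String :=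
    PySem.Set.union (PySem.Set.ofList d1.keys) (PySem.Set.ofList d2.keys)
  (all_fields.foldl (fun m field =>
      if PySem.Str.startswith field "_" then m
      else m.insert field (pvPick (d1.getD field "") (d2.getD field ""))) merged).items

-- Source B's "acc = lst[0]; for fields in lst[1:]: acc = _union(acc, fields)".
-- The [] case is unreachable (every group gets at least one element when built); Source B would raise there.
def pvReduceGroup (lst : List (List (String × String))) : List (String × String) :=
  match lst with
  | [] => []
  | acc :: rest => rest.foldl pvUnionB acc

def merge_bib_entries_alt (entries_list : List (List (String × List (String × String)))) : List (String × List (String × String)) :=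
  let index : PySem.Dict String (List (List (String × String))) :=
    entries_list.foldl
      (fun idx entries =>
        entries.foldl (fun idx kf => idx.modify kf.1 [] (fun l => l ++ [kf.2])) idx)
      PySem.Dict.empty
  (index.items.foldl (fun result kl => result.insert kl.1 (pvReduceGroup kl.2))
    (PySem.Dict.empty : PySem.Dict String (List (String × String)))).items

-- ===== PRECONDITION & SPEC =====
def Spec_merge_bib_entries (entries_list : List (List (String × List (String × String)))) (out : List (String × List (String × String))) : Prop := out = merge_bib_entries_alt entries_list
instance (entries_list : List (List (String × List (String × String)))) (out : List (String × List (String × String))) : Decidable (Spec_merge_bib_entries entries_list out) := by unfold Spec_merge_bib_entries; infer_instance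

-- ===== CLAIM (what is proved, stated in full; the proofs are below) =====
def Claim_equal_merge_bib_entries : Prop := ∀ (entries_list : List (List (String × List (String × String)))), Dom_merge_bib_entries entries_list → Spec_merge_bib_entries entries_list (merge_bib_entries entries_list)

-- ===== LEMMAS AND PROOFS =====

-- the two union helpers are extensionally equal
theorem unionize_eq_pvUnionB (e1 e2 : List (String × String)) :
    unionize_entries e1 e2 = pvUnionB e1 e2 := by
  unfold unionize_entries pvUnionB
  refine congrArg PySem.Dict.items ?_
  refine List.foldl_ext _ _ _ ?_
  intro m field _
  by_cases h : PySem.Str.startswith field "_" = true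
  · rw [if_pos h, if_pos h]
  · rw [if_neg h, if_neg h]
    unfold pvPick
    split_ifs <;> rfl

-- A's loop body rewritten as a single insert of vA
def vA (d : PySem.Dict String (List (String × String))) (p : String × List (String × String)) :
    List (String × String) :=
  match d.get? p.1 with
  | none => p.2
  | some cur => pvUnionB cur p.2

theorem stepA_eq (d : PySem.Dict String (List (String × String)))
    (p : String × List (String × String)) :
    (if d.contains p.1 = false then d.insert p.1 p.2
     else d.insert p.1 (unionize_entries (d.getD p.1 []) p.2)) = d.insert p.1 (vA d p) := by
  rcases h : d.get? p.1 with _ | cur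
  · rw [PySem.Dict.contains_eq_isSome_get?, h]
    simp [vA, h]
  · rw [PySem.Dict.contains_eq_isSome_get?, h]
    have hg : d.getD p.1 [] = cur := PySem.Dict.getD_of_get?_eq_some d [] h
    simp [vA, h, hg, unionize_eq_pvUnionB]

-- reduce of an optional accumulator and a group
def optRed (o : Option (List (String × String))) (l : List (List (String × String))) :
    Option (List (String × String)) :=
  match o, l with
  | none, [] => none
  | none, h :: t => some (t.foldl pvUnionB h)
  | some c, l => some (l.foldl pvUnionB c)

-- characterisation of A's merged dict: the value at k is the left reduce of k's group
theorem foldl_vA_get? (ps : List (String × List (String × String)))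
    (d : PySem.Dict String (List (String × String))) (k : String) :
    (ps.foldl (fun d p => d.insert p.1 (vA d p)) d).get? k
      = optRed (d.get? k) ((ps.filter (fun p => p.1 == k)).map Prod.snd) := by
  induction ps generalizing d with
  | nil => rcases h : d.get? k with _ | c <;> simp [optRed, h]
  | cons p ps ih =>
    simp only [List.foldl_cons, List.filter_cons]
    by_cases hpk : p.1 = k
    · subst hpk
      simp only [BEq.refl, if_pos, List.map_cons]
      rw [ih, PySem.Dict.get?_insert_self]
      rcases h : d.get? p.1 with _ | c
      · simp [vA, h, optRed]
      · cases hl : (ps.filter (fun q => q.1 == p.1)).map Prod.snd <;>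
          simp [vA, h, optRed]
    · have hne : (p.1 == k) = false := by simp [hpk]
      simp only [hne, Bool.false_eq_true, if_false]
      rw [ih, PySem.Dict.get?_insert_of_ne _ _ (fun h => hpk h.symm)]

-- a double loop over a list of lists is the loop over the flattening
theorem foldl_foldl_eq_flatMap {α β : Type} (l : List (List β)) (g : α → β → α) (a : α) :
    l.foldl (fun acc xs => xs.foldl g acc) a = (l.flatMap id).foldl g a := by
  induction l generalizing a with
  | nil => rfl
  | cons xs l ih => simp [List.flatMap_cons, List.foldl_append, ih]

theorem merge_eq (entries_list : List (List (String × List (String × String)))) :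
    merge_bib_entries entries_list = merge_bib_entries_alt entries_list := by
  unfold merge_bib_entries merge_bib_entries_alt
  set ps := entries_list.flatMap id with hps
  rw [foldl_foldl_eq_flatMap, foldl_foldl_eq_flatMap, ← hps]
  -- rewrite A's step into single-insert form
  have hstep :
      (fun (merged : PySem.Dict String (List (String × String)))
           (kf : String × List (String × String)) =>
        if merged.contains kf.1 = false then merged.insert kf.1 kf.2
        else merged.insert kf.1 (unionize_entries (merged.getD kf.1 []) kf.2))
      = fun merged kf => merged.insert kf.1 (vA merged kf) := by
    funext d p; exact stepA_eq d p
  rw [hstep]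
  set dA := ps.foldl (fun d p => d.insert p.1 (vA d p)) PySem.Dict.empty with hdA
  set idx := ps.foldl (fun d p => d.modify p.1 [] (fun l => l ++ [p.2])) PySem.Dict.empty with hidx
  -- keys of both dicts: first occurrences of ps's keys, nodup
  have hkA : dA.keys = PySem.Set.ofList (ps.map Prod.fst) := by
    rw [hdA, PySem.Dict.keys_foldl_insert_key ps Prod.fst vA PySem.Dict.empty,
      PySem.Dict.keys_empty, PySem.Set.update_nil_left]
  have hkI : idx.keys = PySem.Set.ofList (ps.map Prod.fst) := by
    rw [hidx, PySem.Dict.keys_foldl_modify_key ps Prod.fst []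
      (fun _ p l => l ++ [p.2]) PySem.Dict.empty,
      PySem.Dict.keys_empty, PySem.Set.update_nil_left]
  have hndA : dA.keys.Nodup := by
    rw [hdA]
    exact PySem.Dict.nodup_keys_foldl_insert_key ps Prod.fst vA _ PySem.Dict.nodup_keys_empty
  have hndI : idx.keys.Nodup := by
    rw [hidx]
    exact PySem.Dict.nodup_keys_foldl_modify_key ps Prod.fst []
      (fun _ p l => l ++ [p.2]) _ PySem.Dict.nodup_keys_empty
  -- B's second pass inserts fresh distinct keys into an empty dict: it is a map over idx.items
  rw [PySem.Dict.items_foldl_insert_fresh idx.items Prod.fst (fun kl => pvReduceGroup kl.2)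
      PySem.Dict.empty (fun _ _ => PySem.Dict.contains_empty _) hndI]
  have hemp : (PySem.Dict.empty : PySem.Dict String (List (String × String))).items = [] := rfl
  rw [hemp, List.nil_append]
  -- express both sides over the common key list
  rw [PySem.Dict.items_eq_map_keys dA hndA [],
    PySem.Dict.items_eq_map_keys idx hndI [], List.map_map, hkA, hkI]
  refine List.map_congr_left ?_
  intro k hk
  have hkmem : k ∈ ps.map Prod.fst := (PySem.Set.mem_ofList _ _).mp hk
  -- k occurs in ps, so its group is nonempty
  obtain ⟨p, hp, hpk⟩ := List.mem_map.mp hkmem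
  have hfil : p ∈ ps.filter (fun q => q.1 == k) := by
    exact List.mem_filter.mpr ⟨hp, by simp [hpk]⟩
  have hA : dA.get? k = optRed none ((ps.filter (fun q => q.1 == k)).map Prod.snd) := by
    rw [hdA, foldl_vA_get?, PySem.Dict.get?_empty]
  have hI : idx.getD k [] = (ps.filter (fun q => q.1 == k)).map Prod.snd := by
    rw [hidx, PySem.Dict.getD_foldl_modify_append, PySem.Dict.getD_empty, List.nil_append]
  rcases hl : (ps.filter (fun q => q.1 == k)).map Prod.snd with _ | ⟨h, t⟩
  · exact absurd (List.map_eq_nil_iff.mp hl) (List.ne_nil_of_mem hfil)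
  · have : dA.getD k [] = t.foldl pvUnionB h := by
      rw [PySem.Dict.getD_eq_get?_getD, hA, hl]; rfl
    simp [Function.comp, this, hI, hl, pvReduceGroup]

-- ===== VERDICT (by name: the statement is the Claim_ definition above) =====
theorem merge_bib_entries_spec : Claim_equal_merge_bib_entries := by
  intro entries_list _
  exact merge_eq entries_list
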